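-- pv_equiv track=rewrite | github.com/xzcxwh/DeepRare | scripts/acmg_classifier_v2.py | classify_acmg
-- ===== SOURCE A (Python) =====
-- def classify_acmg(pathogenic_evidence, benign_evidence):
--     """根据ACMG规则进行分类"""
--
--     # 计数各级别证据
--     pvs = sum(1 for e in pathogenic_evidence if e.startswith('PVS'))
--     ps = sum(1 for e in pathogenic_evidence if e.startswith('PS'))
--     pm = sum(1 for e in pathogenic_evidence if e.startswith('PM'))
--     pp = sum(1 for e in pathogenic_evidence if e.startswith('PP'))
--
--     ba = sum(1 for e in benign_evidence if e.startswith('BA'))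
--     bs = sum(1 for e in benign_evidence if e.startswith('BS'))
--     bp = sum(1 for e in benign_evidence if e.startswith('BP'))
--
--     # Stand-alone Benign
--     if ba >= 1:
--         return "Benign", "BA1独立证据"
--
--     # Benign
--     if bs >= 2:
--         return "Benign", f"{bs}个强良性证据"
--
--     # Likely Benign
--     if bs >= 1 and bp >= 1:
--         return "Likely_benign", f"{bs}强+{bp}支持良性证据"
--     if bp >= 2:
--         return "Likely_benign", f"{bp}个支持良性证据"
--
--     # Pathogenic
--     if pvs >= 1:
--         if ps >= 1:
--             return "Pathogenic", f"PVS1+{ps}个强致病证据"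
--         if pm >= 2:
--             return "Pathogenic", f"PVS1+{pm}个中等致病证据"
--         if pm >= 1 and pp >= 1:
--             return "Pathogenic", f"PVS1+{pm}中等+{pp}支持证据"
--         if pp >= 2:
--             return "Pathogenic", f"PVS1+{pp}个支持证据"
--
--     if ps >= 2:
--         return "Pathogenic", f"{ps}个强致病证据"
--     if ps >= 1 and pm >= 3:
--         return "Pathogenic", f"{ps}强+{pm}中等证据"
--     if ps >= 1 and pm >= 2 and pp >= 2:
--         return "Pathogenic", f"{ps}强+{pm}中等+{pp}支持证据"
--     if ps >= 1 and pm >= 1 and pp >= 4: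
--         return "Pathogenic", f"{ps}强+{pm}中等+{pp}支持证据"
--
--     # Likely Pathogenic
--     if pvs >= 1 and pm >= 1:
--         return "Likely_pathogenic", f"PVS1+{pm}中等证据"
--     if ps >= 1 and pm >= 1:
--         return "Likely_pathogenic", f"{ps}强+{pm}中等证据"
--     if ps >= 1 and pp >= 2:
--         return "Likely_pathogenic", f"{ps}强+{pp}支持证据"
--     if pm >= 3:
--         return "Likely_pathogenic", f"{pm}个中等证据"
--     if pm >= 2 and pp >= 2:
--         return "Likely_pathogenic", f"{pm}中等+{pp}支持证据"
--     if pm >= 1 and pp >= 4: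
--         return "Likely_pathogenic", f"{pm}中等+{pp}支持证据"
--
--     # VUS - 有一些证据但不足以分类
--     if pvs + ps + pm + pp > 0 or bs + bp > 0:
--         p_score = pvs * 4 + ps * 3 + pm * 2 + pp * 1
--         b_score = bs * 3 + bp * 1
--         if p_score > b_score:
--             return "Uncertain_significance", f"致病倾向(P-{p_score}_vs_B-{b_score})"
--         elif b_score > p_score:
--             return "Uncertain_significance", f"良性倾向(P-{p_score}_vs_B-{b_score})"
--         else:
--             return "Uncertain_significance", f"证据平衡(P-{p_score}_vs_B-{b_score})"
--
--     return "Uncertain_significance", "证据不足"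
-- ===== SOURCE B (Python) =====
-- P_PREFIXES = ('PVS', 'PS', 'PM', 'PP')
-- B_PREFIXES = ('BA', 'BS', 'BP')
--
--
-- def _tally(evidence, prefixes):
--     """One pass: each evidence code is dropped into (at most) one prefix bucket."""
--     counts = dict.fromkeys(prefixes, 0)
--     for e in evidence:
--         for p in prefixes:
--             if e.startswith(p):
--                 counts[p] += 1
--                 break
--     return counts
--
--
-- # Declarative rule base: (requirement vector, classification, message template).
-- # A rule fires when counts[k] >= v for every (k, v) of its requirement vector;
-- # a template segment is a literal string, or a 1-tuple (key,) rendered as counts[key].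
-- _RULES = [
--     ({'BA': 1}, "Benign", ("BA1独立证据",)),
--     ({'BS': 2}, "Benign", (('BS',), "个强良性证据")),
--     ({'BS': 1, 'BP': 1}, "Likely_benign", (('BS',), "强+", ('BP',), "支持良性证据")),
--     ({'BP': 2}, "Likely_benign", (('BP',), "个支持良性证据")),
--     ({'PVS': 1, 'PS': 1}, "Pathogenic", ("PVS1+", ('PS',), "个强致病证据")),
--     ({'PVS': 1, 'PM': 2}, "Pathogenic", ("PVS1+", ('PM',), "个中等致病证据")),
--     ({'PVS': 1, 'PM': 1, 'PP': 1}, "Pathogenic", ("PVS1+", ('PM',), "中等+", ('PP',), "支持证据")),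
--     ({'PVS': 1, 'PP': 2}, "Pathogenic", ("PVS1+", ('PP',), "个支持证据")),
--     ({'PS': 2}, "Pathogenic", (('PS',), "个强致病证据")),
--     ({'PS': 1, 'PM': 3}, "Pathogenic", (('PS',), "强+", ('PM',), "中等证据")),
--     ({'PS': 1, 'PM': 2, 'PP': 2}, "Pathogenic", (('PS',), "强+", ('PM',), "中等+", ('PP',), "支持证据")),
--     ({'PS': 1, 'PM': 1, 'PP': 4}, "Pathogenic", (('PS',), "强+", ('PM',), "中等+", ('PP',), "支持证据")),
--     ({'PVS': 1, 'PM': 1}, "Likely_pathogenic", ("PVS1+", ('PM',), "中等证据")),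
--     ({'PS': 1, 'PM': 1}, "Likely_pathogenic", (('PS',), "强+", ('PM',), "中等证据")),
--     ({'PS': 1, 'PP': 2}, "Likely_pathogenic", (('PS',), "强+", ('PP',), "支持证据")),
--     ({'PM': 3}, "Likely_pathogenic", (('PM',), "个中等证据")),
--     ({'PM': 2, 'PP': 2}, "Likely_pathogenic", (('PM',), "中等+", ('PP',), "支持证据")),
--     ({'PM': 1, 'PP': 4}, "Likely_pathogenic", (('PM',), "中等+", ('PP',), "支持证据")),
-- ]
--
-- _P_WEIGHTS = {'PVS': 4, 'PS': 3, 'PM': 2, 'PP': 1}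
-- _B_WEIGHTS = {'BS': 3, 'BP': 1}
--
--
-- def _render(template, counts):
--     return ''.join(seg if isinstance(seg, str) else str(counts[seg[0]]) for seg in template)
--
--
-- def classify_acmg(pathogenic_evidence, benign_evidence):
--     """根据ACMG规则进行分类 (declarative rule-base interpreter)"""
--     counts = _tally(pathogenic_evidence, P_PREFIXES)
--     counts.update(_tally(benign_evidence, B_PREFIXES))
--
--     for req, cls, template in _RULES:
--         if all(counts[k] >= v for k, v in req.items()):
--             return cls, _render(template, counts)
--
--     if all(counts[k] == 0 for k in (*_P_WEIGHTS, *_B_WEIGHTS)):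
--         return "Uncertain_significance", "证据不足"
--
--     p = sum(counts[k] * w for k, w in _P_WEIGHTS.items())
--     b = sum(counts[k] * w for k, w in _B_WEIGHTS.items())
--     trend = "致病倾向" if p > b else "良性倾向" if b > p else "证据平衡"
--     return "Uncertain_significance", f"{trend}(P-{p}_vs_B-{b})"
-- ===== Notes on version B (the rewrite author's own statement) =====
-- stated objective: alternative
-- what changed: A's seven independent startswith passes and hard-coded early-return if-cascade are replaced by a data-driven interpreter: one bucketing pass per list assigns each code to at most one prefix counter (the prefixes are pairwise non-nested), a declarative rule base of (requirement vector, class, message template) entries is scanned generically for its first satisfied rule with the message rendered from the template, and the VUS fallback scores via weight vectors.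
import Mathlib
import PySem

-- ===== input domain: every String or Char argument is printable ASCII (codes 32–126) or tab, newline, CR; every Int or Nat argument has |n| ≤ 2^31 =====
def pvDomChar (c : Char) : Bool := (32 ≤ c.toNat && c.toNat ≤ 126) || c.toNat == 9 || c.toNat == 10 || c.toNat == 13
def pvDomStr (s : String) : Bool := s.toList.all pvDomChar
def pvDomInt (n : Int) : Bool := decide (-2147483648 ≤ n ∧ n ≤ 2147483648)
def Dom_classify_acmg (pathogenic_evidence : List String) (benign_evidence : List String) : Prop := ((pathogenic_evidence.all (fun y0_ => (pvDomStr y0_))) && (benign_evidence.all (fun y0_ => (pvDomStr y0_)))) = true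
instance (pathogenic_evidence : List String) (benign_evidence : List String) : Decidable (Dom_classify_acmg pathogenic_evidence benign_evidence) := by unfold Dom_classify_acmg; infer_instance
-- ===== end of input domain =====

-- B replaces A's seven startswith passes and hard-coded if-cascade by a data-driven interpreter:
-- one bucketing pass per list into a prefix-count dict, a declarative rule base of requirement
-- vectors with message templates scanned for its first satisfied rule, and weight-vector scoring
-- for the VUS fallback (objective: alternative, same cost).


-- ===== PORT A =====
-- A's nested `if pvs >= 1:` block falls through when no sub-condition holds; `pvAfterPVS_A`
-- is the continuation after that block (the code from `if ps >= 2:` to the end of A).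
def pvVUS_A (pvs ps pm pp bs bp : Int) : String × String :=
  if pvs + ps + pm + pp > 0 ∨ bs + bp > 0 then
    let p_score := pvs * 4 + ps * 3 + pm * 2 + pp * 1
    let b_score := bs * 3 + bp * 1
    if p_score > b_score then
      ("Uncertain_significance", "致病倾向(P-" ++ PySem.Int.toStr p_score ++ "_vs_B-" ++ PySem.Int.toStr b_score ++ ")")
    else if b_score > p_score then
      ("Uncertain_significance", "良性倾向(P-" ++ PySem.Int.toStr p_score ++ "_vs_B-" ++ PySem.Int.toStr b_score ++ ")")
    else
      ("Uncertain_significance", "证据平衡(P-" ++ PySem.Int.toStr p_score ++ "_vs_B-" ++ PySem.Int.toStr b_score ++ ")")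
  else
    ("Uncertain_significance", "证据不足")

def pvAfterPVS_A (pvs ps pm pp bs bp : Int) : String × String :=
  if ps ≥ 2 then ("Pathogenic", PySem.Int.toStr ps ++ "个强致病证据")
  else if ps ≥ 1 ∧ pm ≥ 3 then ("Pathogenic", PySem.Int.toStr ps ++ "强+" ++ PySem.Int.toStr pm ++ "中等证据")
  else if ps ≥ 1 ∧ pm ≥ 2 ∧ pp ≥ 2 then ("Pathogenic", PySem.Int.toStr ps ++ "强+" ++ PySem.Int.toStr pm ++ "中等+" ++ PySem.Int.toStr pp ++ "支持证据")
  else if ps ≥ 1 ∧ pm ≥ 1 ∧ pp ≥ 4 then ("Pathogenic", PySem.Int.toStr ps ++ "强+" ++ PySem.Int.toStr pm ++ "中等+" ++ PySem.Int.toStr pp ++ "支持证据")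
  else if pvs ≥ 1 ∧ pm ≥ 1 then ("Likely_pathogenic", "PVS1+" ++ PySem.Int.toStr pm ++ "中等证据")
  else if ps ≥ 1 ∧ pm ≥ 1 then ("Likely_pathogenic", PySem.Int.toStr ps ++ "强+" ++ PySem.Int.toStr pm ++ "中等证据")
  else if ps ≥ 1 ∧ pp ≥ 2 then ("Likely_pathogenic", PySem.Int.toStr ps ++ "强+" ++ PySem.Int.toStr pp ++ "支持证据")
  else if pm ≥ 3 then ("Likely_pathogenic", PySem.Int.toStr pm ++ "个中等证据")
  else if pm ≥ 2 ∧ pp ≥ 2 then ("Likely_pathogenic", PySem.Int.toStr pm ++ "中等+" ++ PySem.Int.toStr pp ++ "支持证据")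
  else if pm ≥ 1 ∧ pp ≥ 4 then ("Likely_pathogenic", PySem.Int.toStr pm ++ "中等+" ++ PySem.Int.toStr pp ++ "支持证据")
  else pvVUS_A pvs ps pm pp bs bp

def classify_acmg (pathogenic_evidence : List String) (benign_evidence : List String) : String × String :=
  let pvs := pathogenic_evidence.foldl (fun acc e => if PySem.Str.startswith e "PVS" then acc + 1 else acc) (0 : Int)
  let ps := pathogenic_evidence.foldl (fun acc e => if PySem.Str.startswith e "PS" then acc + 1 else acc) (0 : Int)
  let pm := pathogenic_evidence.foldl (fun acc e => if PySem.Str.startswith e "PM" then acc + 1 else acc) (0 : Int)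
  let pp := pathogenic_evidence.foldl (fun acc e => if PySem.Str.startswith e "PP" then acc + 1 else acc) (0 : Int)
  let ba := benign_evidence.foldl (fun acc e => if PySem.Str.startswith e "BA" then acc + 1 else acc) (0 : Int)
  let bs := benign_evidence.foldl (fun acc e => if PySem.Str.startswith e "BS" then acc + 1 else acc) (0 : Int)
  let bp := benign_evidence.foldl (fun acc e => if PySem.Str.startswith e "BP" then acc + 1 else acc) (0 : Int)
  if ba ≥ 1 then ("Benign", "BA1独立证据")
  else if bs ≥ 2 then ("Benign", PySem.Int.toStr bs ++ "个强良性证据")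
  else if bs ≥ 1 ∧ bp ≥ 1 then ("Likely_benign", PySem.Int.toStr bs ++ "强+" ++ PySem.Int.toStr bp ++ "支持良性证据")
  else if bp ≥ 2 then ("Likely_benign", PySem.Int.toStr bp ++ "个支持良性证据")
  else if pvs ≥ 1 then
    if ps ≥ 1 then ("Pathogenic", "PVS1+" ++ PySem.Int.toStr ps ++ "个强致病证据")
    else if pm ≥ 2 then ("Pathogenic", "PVS1+" ++ PySem.Int.toStr pm ++ "个中等致病证据")
    else if pm ≥ 1 ∧ pp ≥ 1 then ("Pathogenic", "PVS1+" ++ PySem.Int.toStr pm ++ "中等+" ++ PySem.Int.toStr pp ++ "支持证据")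
    else if pp ≥ 2 then ("Pathogenic", "PVS1+" ++ PySem.Int.toStr pp ++ "个支持证据")
    else pvAfterPVS_A pvs ps pm pp bs bp
  else pvAfterPVS_A pvs ps pm pp bs bp

-- ===== PORT B =====
-- a message-template segment: a literal piece of text, or the count of a prefix key
inductive PvSeg
  | lit : String → PvSeg
  | cnt : String → PvSeg

def pvPPrefixes : List String := ["PVS", "PS", "PM", "PP"]
def pvBPrefixes : List String := ["BA", "BS", "BP"]

-- B's inner `for p in prefixes: if e.startswith(p): counts[p] += 1; break` loop
def pvBump (prefixes : List String) (counts : PySem.Dict String Int) (e : String) : PySem.Dict String Int :=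
  match prefixes.find? (fun p => PySem.Str.startswith e p) with
  | some p => counts.modify p 0 (· + 1)
  | none => counts

-- B's `_tally`: one pass, each code dropped into (at most) one prefix bucket
def pvTally (evidence : List String) (prefixes : List String) : PySem.Dict String Int :=
  evidence.foldl (pvBump prefixes) (prefixes.foldl (fun d p => d.insert p 0) PySem.Dict.empty)

-- B's `_RULES`: (requirement vector, classification, message template)
def pvRules : List (List (String × Int) × String × List PvSeg) :=
  [ ([("BA", 1)], "Benign", [.lit "BA1独立证据"]),
    ([("BS", 2)], "Benign", [.cnt "BS", .lit "个强良性证据"]),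
    ([("BS", 1), ("BP", 1)], "Likely_benign", [.cnt "BS", .lit "强+", .cnt "BP", .lit "支持良性证据"]),
    ([("BP", 2)], "Likely_benign", [.cnt "BP", .lit "个支持良性证据"]),
    ([("PVS", 1), ("PS", 1)], "Pathogenic", [.lit "PVS1+", .cnt "PS", .lit "个强致病证据"]),
    ([("PVS", 1), ("PM", 2)], "Pathogenic", [.lit "PVS1+", .cnt "PM", .lit "个中等致病证据"]),
    ([("PVS", 1), ("PM", 1), ("PP", 1)], "Pathogenic", [.lit "PVS1+", .cnt "PM", .lit "中等+", .cnt "PP", .lit "支持证据"]),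
    ([("PVS", 1), ("PP", 2)], "Pathogenic", [.lit "PVS1+", .cnt "PP", .lit "个支持证据"]),
    ([("PS", 2)], "Pathogenic", [.cnt "PS", .lit "个强致病证据"]),
    ([("PS", 1), ("PM", 3)], "Pathogenic", [.cnt "PS", .lit "强+", .cnt "PM", .lit "中等证据"]),
    ([("PS", 1), ("PM", 2), ("PP", 2)], "Pathogenic", [.cnt "PS", .lit "强+", .cnt "PM", .lit "中等+", .cnt "PP", .lit "支持证据"]),
    ([("PS", 1), ("PM", 1), ("PP", 4)], "Pathogenic", [.cnt "PS", .lit "强+", .cnt "PM", .lit "中等+", .cnt "PP", .lit "支持证据"]),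
    ([("PVS", 1), ("PM", 1)], "Likely_pathogenic", [.lit "PVS1+", .cnt "PM", .lit "中等证据"]),
    ([("PS", 1), ("PM", 1)], "Likely_pathogenic", [.cnt "PS", .lit "强+", .cnt "PM", .lit "中等证据"]),
    ([("PS", 1), ("PP", 2)], "Likely_pathogenic", [.cnt "PS", .lit "强+", .cnt "PP", .lit "支持证据"]),
    ([("PM", 3)], "Likely_pathogenic", [.cnt "PM", .lit "个中等证据"]),
    ([("PM", 2), ("PP", 2)], "Likely_pathogenic", [.cnt "PM", .lit "中等+", .cnt "PP", .lit "支持证据"]),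
    ([("PM", 1), ("PP", 4)], "Likely_pathogenic", [.cnt "PM", .lit "中等+", .cnt "PP", .lit "支持证据"]) ]

-- B's `_render`: the `msg += …` loop over the template segments
def pvRender (template : List PvSeg) (counts : PySem.Dict String Int) : String :=
  template.foldl
    (fun msg seg => msg ++ (match seg with | .lit s => s | .cnt k => PySem.Int.toStr (counts.getD k 0))) ""

-- B's rule loop: (class, rendered message) of the first rule whose requirements all hold
def pvFirstRule (counts : PySem.Dict String Int) :
    List (List (String × Int) × String × List PvSeg) → Option (String × String)
  | [] => none
  | r :: rs =>
      if r.1.all (fun kv => decide (counts.getD kv.1 0 ≥ kv.2)) then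
        some (r.2.1, pvRender r.2.2 counts)
      else pvFirstRule counts rs

def pvScoreKeys : List String := ["PVS", "PS", "PM", "PP", "BS", "BP"]
def pvPWeights : List (String × Int) := [("PVS", 4), ("PS", 3), ("PM", 2), ("PP", 1)]
def pvBWeights : List (String × Int) := [("BS", 3), ("BP", 1)]

-- B's code after the rule loop (the VUS fallback with weight-vector scoring)
def pvFallback_B (counts : PySem.Dict String Int) : String × String :=
  if pvScoreKeys.all (fun k => counts.getD k 0 == 0) then
    ("Uncertain_significance", "证据不足")
  else
    let p := pvPWeights.foldl (fun s kv => s + counts.getD kv.1 0 * kv.2) 0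
    let b := pvBWeights.foldl (fun s kv => s + counts.getD kv.1 0 * kv.2) 0
    let trend := if p > b then "致病倾向" else if b > p then "良性倾向" else "证据平衡"
    ("Uncertain_significance", trend ++ "(P-" ++ PySem.Int.toStr p ++ "_vs_B-" ++ PySem.Int.toStr b ++ ")")

def classify_acmg_alt (pathogenic_evidence : List String) (benign_evidence : List String) : String × String :=
  let counts := (pvTally pathogenic_evidence pvPPrefixes).update (pvTally benign_evidence pvBPrefixes).items
  (pvFirstRule counts pvRules).getD (pvFallback_B counts)

-- ===== PRECONDITION & SPEC =====
def Spec_classify_acmg (pathogenic_evidence : List String) (benign_evidence : List String) (out : String × String) : Prop := out = classify_acmg_alt pathogenic_evidence benign_evidence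
instance (pathogenic_evidence : List String) (benign_evidence : List String) (out : String × String) : Decidable (Spec_classify_acmg pathogenic_evidence benign_evidence out) := by unfold Spec_classify_acmg; infer_instance

-- ===== CLAIM (what is proved, stated in full; the proofs are below) =====
def Claim_equal_classify_acmg : Prop := ∀ (pathogenic_evidence : List String) (benign_evidence : List String), Dom_classify_acmg pathogenic_evidence benign_evidence → Spec_classify_acmg pathogenic_evidence benign_evidence (classify_acmg pathogenic_evidence benign_evidence)

-- ===== LEMMAS AND PROOFS =====

-- the 7-key count dictionary B's scan and fallback run on (proof-only abbreviation)
def pvD7 (pvs ps pm pp ba bs bp : Int) : PySem.Dict String Int :=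
  ⟨[("PVS", pvs), ("PS", ps), ("PM", pm), ("PP", pp), ("BA", ba), ("BS", bs), ("BP", bp)]⟩

-- the seven ACMG prefixes are pairwise non-nested, so each code matches at most one of them
theorem pvChars_ff (l : List Char) (x y : List Char) (hlen : x.length ≤ y.length)
    (hnp : ¬ x <+: y) (hy : PySem.Chars.startswith l y = true) :
    PySem.Chars.startswith l x = false := by
  rw [PySem.Chars.startswith_iff] at hy
  by_contra hc
  simp only [Bool.not_eq_false] at hc
  rw [PySem.Chars.startswith_iff] at hc
  exact hnp (List.prefix_of_prefix_length_le hc hy hlen)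

theorem pvTallyP_go (l : List String) (a b c d : Int) :
    List.foldl (pvBump pvPPrefixes) ⟨[("PVS", a), ("PS", b), ("PM", c), ("PP", d)]⟩ l
    = ⟨[("PVS", a + (l.countP (fun e => PySem.Str.startswith e "PVS") : Int)),
        ("PS", b + (l.countP (fun e => PySem.Str.startswith e "PS") : Int)),
        ("PM", c + (l.countP (fun e => PySem.Str.startswith e "PM") : Int)),
        ("PP", d + (l.countP (fun e => PySem.Str.startswith e "PP") : Int))]⟩ := by
  induction l generalizing a b c d with
  | nil => simp
  | cons x t ih =>
    rw [List.foldl_cons]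
    cases h1 : PySem.Chars.startswith x.toList ['P','V','S']
    case true =>
      have h2 := pvChars_ff x.toList ['P','S'] _ (by decide) (by decide) h1
      have h3 := pvChars_ff x.toList ['P','M'] _ (by decide) (by decide) h1
      have h4 := pvChars_ff x.toList ['P','P'] _ (by decide) (by decide) h1
      rw [show pvBump pvPPrefixes ⟨[("PVS", a), ("PS", b), ("PM", c), ("PP", d)]⟩ x
            = ⟨[("PVS", a + 1), ("PS", b), ("PM", c), ("PP", d)]⟩ from by
        simp [pvBump, pvPPrefixes, List.find?, h1, PySem.Dict.modify, PySem.Dict.getD,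
          PySem.Dict.get?, PySem.Dict.insert, PySem.Dict.contains], ih]
      simp [h1, h2, h3, h4]
      omega
    case false =>
      cases h2 : PySem.Chars.startswith x.toList ['P','S']
      case true =>
        have h3 := pvChars_ff x.toList ['P','M'] _ (by decide) (by decide) h2
        have h4 := pvChars_ff x.toList ['P','P'] _ (by decide) (by decide) h2
        rw [show pvBump pvPPrefixes ⟨[("PVS", a), ("PS", b), ("PM", c), ("PP", d)]⟩ x
              = ⟨[("PVS", a), ("PS", b + 1), ("PM", c), ("PP", d)]⟩ from by
          simp [pvBump, pvPPrefixes, List.find?, h1, h2, PySem.Dict.modify, PySem.Dict.getD,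
            PySem.Dict.get?, PySem.Dict.insert, PySem.Dict.contains], ih]
        simp [h1, h2, h3, h4]
        omega
      case false =>
        cases h3 : PySem.Chars.startswith x.toList ['P','M']
        case true =>
          have h4 := pvChars_ff x.toList ['P','P'] _ (by decide) (by decide) h3
          rw [show pvBump pvPPrefixes ⟨[("PVS", a), ("PS", b), ("PM", c), ("PP", d)]⟩ x
                = ⟨[("PVS", a), ("PS", b), ("PM", c + 1), ("PP", d)]⟩ from by
            simp [pvBump, pvPPrefixes, List.find?, h1, h2, h3, PySem.Dict.modify, PySem.Dict.getD,
              PySem.Dict.get?, PySem.Dict.insert, PySem.Dict.contains], ih]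
          simp [h1, h2, h3, h4]
          omega
        case false =>
          cases h4 : PySem.Chars.startswith x.toList ['P','P']
          case true =>
            rw [show pvBump pvPPrefixes ⟨[("PVS", a), ("PS", b), ("PM", c), ("PP", d)]⟩ x
                  = ⟨[("PVS", a), ("PS", b), ("PM", c), ("PP", d + 1)]⟩ from by
              simp [pvBump, pvPPrefixes, List.find?, h1, h2, h3, h4, PySem.Dict.modify, PySem.Dict.getD,
                PySem.Dict.get?, PySem.Dict.insert, PySem.Dict.contains], ih]
            simp [h1, h2, h3, h4]
            omega
          case false =>
            rw [show pvBump pvPPrefixes ⟨[("PVS", a), ("PS", b), ("PM", c), ("PP", d)]⟩ x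
                  = ⟨[("PVS", a), ("PS", b), ("PM", c), ("PP", d)]⟩ from by
              simp [pvBump, pvPPrefixes, List.find?, h1, h2, h3, h4], ih]
            simp [h1, h2, h3, h4]

theorem pvTallyB_go (l : List String) (a b c : Int) :
    List.foldl (pvBump pvBPrefixes) ⟨[("BA", a), ("BS", b), ("BP", c)]⟩ l
    = ⟨[("BA", a + (l.countP (fun e => PySem.Str.startswith e "BA") : Int)),
        ("BS", b + (l.countP (fun e => PySem.Str.startswith e "BS") : Int)),
        ("BP", c + (l.countP (fun e => PySem.Str.startswith e "BP") : Int))]⟩ := by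
  induction l generalizing a b c with
  | nil => simp
  | cons x t ih =>
    rw [List.foldl_cons]
    cases h1 : PySem.Chars.startswith x.toList ['B','A']
    case true =>
      have h2 := pvChars_ff x.toList ['B','S'] _ (by decide) (by decide) h1
      have h3 := pvChars_ff x.toList ['B','P'] _ (by decide) (by decide) h1
      rw [show pvBump pvBPrefixes ⟨[("BA", a), ("BS", b), ("BP", c)]⟩ x
            = ⟨[("BA", a + 1), ("BS", b), ("BP", c)]⟩ from by
        simp [pvBump, pvBPrefixes, List.find?, h1, PySem.Dict.modify, PySem.Dict.getD,
          PySem.Dict.get?, PySem.Dict.insert, PySem.Dict.contains], ih]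
      simp [h1, h2, h3]
      omega
    case false =>
      cases h2 : PySem.Chars.startswith x.toList ['B','S']
      case true =>
        have h3 := pvChars_ff x.toList ['B','P'] _ (by decide) (by decide) h2
        rw [show pvBump pvBPrefixes ⟨[("BA", a), ("BS", b), ("BP", c)]⟩ x
              = ⟨[("BA", a), ("BS", b + 1), ("BP", c)]⟩ from by
          simp [pvBump, pvBPrefixes, List.find?, h1, h2, PySem.Dict.modify, PySem.Dict.getD,
            PySem.Dict.get?, PySem.Dict.insert, PySem.Dict.contains], ih]
        simp [h1, h2, h3]
        omega
      case false =>
        cases h3 : PySem.Chars.startswith x.toList ['B','P']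
        case true =>
          rw [show pvBump pvBPrefixes ⟨[("BA", a), ("BS", b), ("BP", c)]⟩ x
                = ⟨[("BA", a), ("BS", b), ("BP", c + 1)]⟩ from by
            simp [pvBump, pvBPrefixes, List.find?, h1, h2, h3, PySem.Dict.modify, PySem.Dict.getD,
              PySem.Dict.get?, PySem.Dict.insert, PySem.Dict.contains], ih]
          simp [h1, h2, h3]
          omega
        case false =>
          rw [show pvBump pvBPrefixes ⟨[("BA", a), ("BS", b), ("BP", c)]⟩ x
                = ⟨[("BA", a), ("BS", b), ("BP", c)]⟩ from by
            simp [pvBump, pvBPrefixes, List.find?, h1, h2, h3], ih]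
          simp [h1, h2, h3]

-- getD through a conditional option (the `for … return` / post-loop shape)
theorem pvGetDIf (c : Prop) [Decidable c] (v fb : String × String) (o : Option (String × String)) :
    (if c then some v else o).getD fb = if c then v else o.getD fb := by split_ifs <;> rfl

theorem pvVUS_eq (pvs ps pm pp ba bs bp : Nat) :
    pvVUS_A ↑pvs ↑ps ↑pm ↑pp ↑bs ↑bp = pvFallback_B (pvD7 ↑pvs ↑ps ↑pm ↑pp ↑ba ↑bs ↑bp) := by
  unfold pvVUS_A pvFallback_B pvD7
  simp [pvScoreKeys, pvPWeights, pvBWeights, PySem.Dict.getD, PySem.Dict.get?, List.find?]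
  by_cases hz : pvs = 0 ∧ ps = 0 ∧ pm = 0 ∧ pp = 0 ∧ bs = 0 ∧ bp = 0
  · obtain ⟨h1,h2,h3,h4,h5,h6⟩ := hz
    subst h1 h2 h3 h4 h5 h6
    norm_num
  · rw [if_pos (by omega), if_neg hz]
    split_ifs <;> simp

theorem pvDecide (pvs ps pm pp ba bs bp : Nat) :
    (if (ba : Int) ≥ 1 then (("Benign", "BA1独立证据") : String × String)
     else if (bs : Int) ≥ 2 then ("Benign", PySem.Int.toStr ↑bs ++ "个强良性证据")
     else if (bs : Int) ≥ 1 ∧ (bp : Int) ≥ 1 then ("Likely_benign", PySem.Int.toStr ↑bs ++ "强+" ++ PySem.Int.toStr ↑bp ++ "支持良性证据")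
     else if (bp : Int) ≥ 2 then ("Likely_benign", PySem.Int.toStr ↑bp ++ "个支持良性证据")
     else if (pvs : Int) ≥ 1 then
       if (ps : Int) ≥ 1 then ("Pathogenic", "PVS1+" ++ PySem.Int.toStr ↑ps ++ "个强致病证据")
       else if (pm : Int) ≥ 2 then ("Pathogenic", "PVS1+" ++ PySem.Int.toStr ↑pm ++ "个中等致病证据")
       else if (pm : Int) ≥ 1 ∧ (pp : Int) ≥ 1 then ("Pathogenic", "PVS1+" ++ PySem.Int.toStr ↑pm ++ "中等+" ++ PySem.Int.toStr ↑pp ++ "支持证据")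
       else if (pp : Int) ≥ 2 then ("Pathogenic", "PVS1+" ++ PySem.Int.toStr ↑pp ++ "个支持证据")
       else pvAfterPVS_A ↑pvs ↑ps ↑pm ↑pp ↑bs ↑bp
     else pvAfterPVS_A ↑pvs ↑ps ↑pm ↑pp ↑bs ↑bp)
    = (pvFirstRule (pvD7 ↑pvs ↑ps ↑pm ↑pp ↑ba ↑bs ↑bp) pvRules).getD
        (pvFallback_B (pvD7 ↑pvs ↑ps ↑pm ↑pp ↑ba ↑bs ↑bp)) := by
  unfold pvAfterPVS_A
  rw [pvVUS_eq pvs ps pm pp ba bs bp]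
  simp only [pvRules, pvFirstRule, pvRender, pvD7, List.all_cons, List.all_nil, List.foldl_cons, List.foldl_nil]
  simp [PySem.Dict.getD, PySem.Dict.get?, List.find?, pvGetDIf]
  by_cases hpvs : pvs = 0
  · simp [hpvs]
  · have h : 1 ≤ pvs := by omega
    simp [h]

theorem classify_acmg_eq_alt (pe be : List String) :
    classify_acmg pe be = classify_acmg_alt pe be := by
  unfold classify_acmg classify_acmg_alt pvTally
  rw [show (pvPPrefixes.foldl (fun d p => d.insert p 0) PySem.Dict.empty)
        = (⟨[("PVS", 0), ("PS", 0), ("PM", 0), ("PP", 0)]⟩ : PySem.Dict String Int) from rfl,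
      show (pvBPrefixes.foldl (fun d p => d.insert p 0) PySem.Dict.empty)
        = (⟨[("BA", 0), ("BS", 0), ("BP", 0)]⟩ : PySem.Dict String Int) from rfl,
      pvTallyP_go, pvTallyB_go]
  simp only [PySem.List.foldl_if_add_one, zero_add]
  rw [show PySem.Dict.update
        (⟨[("PVS", (pe.countP (fun e => PySem.Str.startswith e "PVS") : Int)),
           ("PS", (pe.countP (fun e => PySem.Str.startswith e "PS") : Int)),
           ("PM", (pe.countP (fun e => PySem.Str.startswith e "PM") : Int)),
           ("PP", (pe.countP (fun e => PySem.Str.startswith e "PP") : Int))]⟩ : PySem.Dict String Int)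
        (PySem.Dict.items ⟨[("BA", (be.countP (fun e => PySem.Str.startswith e "BA") : Int)),
           ("BS", (be.countP (fun e => PySem.Str.startswith e "BS") : Int)),
           ("BP", (be.countP (fun e => PySem.Str.startswith e "BP") : Int))]⟩)
      = pvD7 (pe.countP (fun e => PySem.Str.startswith e "PVS") : Int)
          (pe.countP (fun e => PySem.Str.startswith e "PS") : Int)
          (pe.countP (fun e => PySem.Str.startswith e "PM") : Int)
          (pe.countP (fun e => PySem.Str.startswith e "PP") : Int)
          (be.countP (fun e => PySem.Str.startswith e "BA") : Int)
          (be.countP (fun e => PySem.Str.startswith e "BS") : Int)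
          (be.countP (fun e => PySem.Str.startswith e "BP") : Int) from by
    simp [pvD7, PySem.Dict.update, PySem.Dict.insert, PySem.Dict.contains]]
  exact pvDecide _ _ _ _ _ _ _

-- ===== VERDICT (by name: the statement is the Claim_ definition above) =====
theorem classify_acmg_spec : Claim_equal_classify_acmg := by
  intro pe be _
  unfold Spec_classify_acmg
  exact classify_acmg_eq_alt pe be
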